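-- pv_equiv track=rewrite | github.com/shunsuke-toba/kaggle-google-code-golf-2025 | 399/2_plain_code.py | p
-- ===== SOURCE A (Python) =====
-- def p(grid):
--     # 色付きマス（0以外）の個数を数える
--     colored_count = sum(map(bool, sum(grid, [])))
--
--     # 4で割って塗る個数を決める
--     paint_count = colored_count // 4
--
--     # 3×3の出力グリッドを初期化
--     result = [[0, 0, 0], [0, 0, 0], [0, 0, 0]]
--
--     # x座標とy座標の和が偶数のマスのリスト（チェスボード模様）
--     even_positions = []
--     for i in range(3):
--         for j in range(3):
--             if (i + j) % 2 == 0: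
--                 even_positions.append((i, j))
--
--     # paint_count個だけ1で塗る
--     for k in range(min(paint_count, len(even_positions))):
--         i, j = even_positions[k]
--         result[i][j] = 1
--
--     return result
-- ===== SOURCE B (Python) =====
-- TABLE = [
--     [[0, 0, 0], [0, 0, 0], [0, 0, 0]],
--     [[1, 0, 0], [0, 0, 0], [0, 0, 0]],
--     [[1, 0, 1], [0, 0, 0], [0, 0, 0]],
--     [[1, 0, 1], [0, 1, 0], [0, 0, 0]],
--     [[1, 0, 1], [0, 1, 0], [1, 0, 0]],
--     [[1, 0, 1], [0, 1, 0], [1, 0, 1]],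
-- ]
--
--
-- def p(grid):
--     colored = sum(1 for row in grid for x in row if x)
--     k = min(colored // 4, 5)
--     return [row[:] for row in TABLE[k]]
-- ===== Notes on version B (the rewrite author's own statement) =====
-- stated objective: simpler
-- what changed: Replaced A's quadratic sum(grid, []) flatten, checkerboard-position construction and in-place painting loop with a one-pass count of nonzero cells and a lookup into a precomputed table of the six possible 3x3 outputs (rows copied fresh).
import Mathlib
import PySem

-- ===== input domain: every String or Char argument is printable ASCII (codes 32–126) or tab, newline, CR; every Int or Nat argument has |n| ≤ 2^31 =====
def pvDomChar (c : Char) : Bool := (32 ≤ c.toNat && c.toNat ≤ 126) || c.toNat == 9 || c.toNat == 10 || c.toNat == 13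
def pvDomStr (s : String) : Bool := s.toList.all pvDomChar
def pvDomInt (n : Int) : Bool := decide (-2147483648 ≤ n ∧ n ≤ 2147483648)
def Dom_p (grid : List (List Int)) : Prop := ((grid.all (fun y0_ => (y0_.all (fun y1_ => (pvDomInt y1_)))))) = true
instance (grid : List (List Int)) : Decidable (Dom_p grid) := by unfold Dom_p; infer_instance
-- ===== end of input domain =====

-- B replaces A's position-list construction and painting loop with a nonzero count
-- and a lookup into a precomputed table of the six possible outputs (objective: simpler).

-- ===== PORT A =====
-- even_positions: the double loop appending (i,j) with (i+j) % 2 == 0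
def pEvenPositions : List (Int × Int) :=
  (PySem.List.pyRange 0 3 1).foldl (fun acc i =>
    (PySem.List.pyRange 0 3 1).foldl (fun acc j =>
      if PySem.Int.mod (i + j) 2 = 0 then acc ++ [(i, j)] else acc) acc) []

-- result[i][j] = 1 (nested index assignment; pyGetD/pySetD total forms, indices here are always 0..2)
def pPaintStep (positions : List (Int × Int)) (res : List (List Int)) (k : Int) : List (List Int) :=
  match PySem.List.pyGet? positions k with
  | some (i, j) => PySem.List.pySetD res i (PySem.List.pySetD (PySem.List.pyGetD res i []) j 1)
  | none => res

def p (grid : List (List Int)) : List (List Int) :=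
  let flat := grid.foldl (fun acc row => acc ++ row) []
  let coloredCount : Int := (flat.map (fun x => if x ≠ 0 then (1 : Int) else 0)).sum
  let paintCount := PySem.Int.floordiv coloredCount 4
  let result : List (List Int) := [[0, 0, 0], [0, 0, 0], [0, 0, 0]]
  (PySem.List.pyRange 0 (min paintCount (pEvenPositions.length : Int)) 1).foldl (pPaintStep pEvenPositions) result

-- ===== PORT B =====
def pvTable : List (List (List Int)) :=
  [ [[0, 0, 0], [0, 0, 0], [0, 0, 0]],
    [[1, 0, 0], [0, 0, 0], [0, 0, 0]],
    [[1, 0, 1], [0, 0, 0], [0, 0, 0]],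
    [[1, 0, 1], [0, 1, 0], [0, 0, 0]],
    [[1, 0, 1], [0, 1, 0], [1, 0, 0]],
    [[1, 0, 1], [0, 1, 0], [1, 0, 1]] ]

def p_alt (grid : List (List Int)) : List (List Int) :=
  let colored : Int := (grid.map (fun row => ((row.filter (fun x => x ≠ 0)).length : Int))).sum
  let k := min (PySem.Int.floordiv colored 4) 5
  -- TABLE[k]; k is always in range, .getD [] only totalises; row[:] copies each row
  ((PySem.List.pyGet? pvTable k).getD []).map (fun row => row)

-- ===== PRECONDITION & SPEC =====
def Spec_p (grid : List (List Int)) (out : List (List Int)) : Prop := out = p_alt grid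
instance (grid : List (List Int)) (out : List (List Int)) : Decidable (Spec_p grid out) := by unfold Spec_p; infer_instance

-- ===== CLAIM (what is proved, stated in full; the proofs are below) =====
def Claim_equal_p : Prop := ∀ (grid : List (List Int)), Dom_p grid → Spec_p grid (p grid)

-- ===== LEMMAS AND PROOFS =====

-- sum(grid, []) is grid.flatten
lemma foldl_append_flatten (grid : List (List Int)) (acc : List Int) :
    grid.foldl (fun a r => a ++ r) acc = acc ++ grid.flatten := by
  induction grid generalizing acc with
  | nil => simp
  | cons r t ih => simp [List.foldl_cons, ih, List.append_assoc]

-- the 0/1 indicator sum is the filtered length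
lemma sum_ind_eq_filter_len (l : List Int) :
    (l.map (fun x => if x ≠ 0 then (1 : Int) else 0)).sum
      = ((l.filter (fun x => x ≠ 0)).length : Int) := by
  induction l with
  | nil => simp
  | cons x t ih =>
    rw [List.map_cons, List.sum_cons, ih, List.filter_cons]
    by_cases h : x = 0
    · simp [h]
    · simp [h]
      omega

-- A's count over the flattened grid equals B's row-by-row count
lemma counts_eq (grid : List (List Int)) :
    ((grid.foldl (fun a r => a ++ r) []).map (fun x => if x ≠ 0 then (1 : Int) else 0)).sum
      = (grid.map (fun row => ((row.filter (fun x => x ≠ 0)).length : Int))).sum := by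
  rw [foldl_append_flatten, List.nil_append, sum_ind_eq_filter_len]
  induction grid with
  | nil => simp
  | cons r t ih =>
    simp only [List.flatten_cons, List.filter_append, List.length_append, List.map_cons,
      List.sum_cons]
    push_cast
    rw [ih]

-- evaluating the closed constructions (pyRange is rewritten away first: the kernel
-- cannot unfold it directly)
lemma even_eval : pEvenPositions = [(0, 0), (0, 2), (1, 1), (2, 0), (2, 2)] := by
  unfold pEvenPositions
  rw [PySem.List.pyRange_one]
  decide

-- both results are the same function of the colored count
lemma key (c : Int) (hc : 0 ≤ c) :
    (PySem.List.pyRange 0 (min (PySem.Int.floordiv c 4) (pEvenPositions.length : Int)) 1).foldl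
        (pPaintStep pEvenPositions) [[0, 0, 0], [0, 0, 0], [0, 0, 0]]
      = ((PySem.List.pyGet? pvTable (min (PySem.Int.floordiv c 4) 5)).getD []).map (fun row => row) := by
  have hlen : (pEvenPositions.length : Int) = 5 := by rw [even_eval]; decide
  rw [hlen]
  have hd : PySem.Int.floordiv c 4 = c / 4 := PySem.Int.floordiv_eq_ediv_of_pos (by omega)
  rw [hd]
  have h4 : 0 ≤ c / 4 := by omega
  have hm : min (c / 4) 5 = 0 ∨ min (c / 4) 5 = 1 ∨ min (c / 4) 5 = 2 ∨ min (c / 4) 5 = 3 ∨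
      min (c / 4) 5 = 4 ∨ min (c / 4) 5 = 5 := by omega
  rw [even_eval]
  rcases hm with h | h | h | h | h | h <;> rw [h, PySem.List.pyRange_one] <;> decide

-- ===== VERDICT (by name: the statement is the Claim_ definition above) =====
theorem p_spec : Claim_equal_p := by
  intro grid _
  show p grid = p_alt grid
  unfold p p_alt
  simp only []
  rw [counts_eq]
  exact key _ (List.sum_nonneg (fun x hx => by
    rcases List.mem_map.mp hx with ⟨row, _, rfl⟩
    exact Int.natCast_nonneg _))
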